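-- pv_equiv track=rewrite | github.com/confluentinc/connect-migration-utility | src/transform_processor.py | extract_transforms_config
-- ===== SOURCE A (Python) =====
-- from typing import Dict, Any, List, Set, Optional
--
-- def extract_transforms_config(config: Dict[str, Any]) -> Dict[str, Any]:
--     """Extract transform-related configs from connector config"""
--     transforms_config = {}
--
--     transforms_chain = config.get("transforms", "")
--     if transforms_chain:
--         transforms_config["transforms"] = transforms_chain
--
--         aliases = [alias.strip() for alias in transforms_chain.split(",") if alias.strip()]
--         for alias in aliases:
--             for key, value in config.items():
--                 if isinstance(key, str) and key.startswith(f"transforms.{alias}."):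
--                     transforms_config[key] = value
--
--     predicates_chain = config.get("predicates", "")
--     if predicates_chain:
--         transforms_config["predicates"] = predicates_chain
--
--         aliases = [alias.strip() for alias in predicates_chain.split(",") if alias.strip()]
--         for alias in aliases:
--             for key, value in config.items():
--                 if isinstance(key, str) and key.startswith(f"predicates.{alias}."):
--                     transforms_config[key] = value
--
--     return transforms_config
-- ===== SOURCE B (Python) =====
-- def _aliases(chain):
--     return [raw.strip() for raw in chain.split(",") if raw.strip()]
--
--
-- def _first_match(key, prefixes):
--     for j, p in enumerate(prefixes):
--         if key.startswith(p):
--             return j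
--     return None
--
--
-- def _section(config, sec):
--     chain = config.get(sec, "")
--     if not chain:
--         return []
--     aliases = list(dict.fromkeys(_aliases(chain)))
--     prefixes = [f"{sec}.{a}." for a in aliases]
--     buckets = [[] for _ in aliases]
--     for kv in config.items():
--         j = _first_match(kv[0], prefixes)
--         if j is not None:
--             buckets[j].append(kv)
--     return [(sec, chain)] + [kv for b in buckets for kv in b]
--
--
-- def extract_transforms_config(config):
--     """Extract transform-related configs from connector config"""
--     return dict(_section(config, "transforms") + _section(config, "predicates"))
-- ===== Notes on version B (the rewrite author's own statement) =====
-- stated objective: alternative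
-- what changed: A rescans the whole config once per transform/predicate alias and builds the result by dict re-insertion; B makes a single pass over the config, assigning each entry to the bucket of its first matching (deduplicated) alias prefix, then concatenates the buckets in alias order.
import Mathlib
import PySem

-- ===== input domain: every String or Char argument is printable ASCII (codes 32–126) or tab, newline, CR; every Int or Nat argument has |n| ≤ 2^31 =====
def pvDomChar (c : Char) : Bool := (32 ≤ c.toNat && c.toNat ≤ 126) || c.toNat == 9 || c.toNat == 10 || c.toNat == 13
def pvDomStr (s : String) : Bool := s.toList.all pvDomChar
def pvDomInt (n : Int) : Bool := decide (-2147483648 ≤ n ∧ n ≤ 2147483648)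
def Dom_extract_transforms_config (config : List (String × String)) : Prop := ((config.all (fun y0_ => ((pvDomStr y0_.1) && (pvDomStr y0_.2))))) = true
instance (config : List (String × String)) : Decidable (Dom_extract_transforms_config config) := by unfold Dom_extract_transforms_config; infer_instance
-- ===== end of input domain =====

-- B replaces A's alias-by-alias rescans of the whole config (dict re-insertion) by one pass
-- over the config that assigns each key its first matching alias bucket; same return value.

-- ===== PORT A =====
-- [alias.strip() for alias in chain.split(",") if alias.strip()]  (identical text in both Pythons)
def pvAliases (chain : List Char) : List (List Char) :=
  ((PySem.Chars.splitOn chain [',']).filter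
      (fun raw => !(PySem.Chars.strip raw).isEmpty)).map PySem.Chars.strip

-- f"{sec}.{a}."  as a character list (both Pythons build this prefix)
def pvPrefix (sec a : List Char) : List Char := sec ++ '.' :: (a ++ ['.'])

-- one of A's two identical blocks, parametric in the section name
-- ('isinstance(key, str)' is always true under the type convention)
def pvSectionA (config : List (String × String)) (sec : String)
    (d0 : PySem.Dict String String) : PySem.Dict String String :=
  let chain := (List.lookup sec config).getD ""
  if chain = "" then d0
  else
    let d1 := d0.insert sec chain
    (pvAliases chain.toList).foldl
      (fun d a => config.foldl
        (fun d kv =>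
          if PySem.Chars.startswith kv.1.toList (pvPrefix sec.toList a) then
            d.insert kv.1 kv.2
          else d) d) d1

def extract_transforms_config (config : List (String × String)) : List (String × String) :=
  (pvSectionA config "predicates" (pvSectionA config "transforms" PySem.Dict.empty)).items

-- ===== PORT B =====
-- Source B's _first_match: index of the first prefix that matches, else None
def pvFirstMatch (key : List Char) : List (List Char) → Option Nat
  | [] => none
  | p :: ps =>
    if PySem.Chars.startswith key p then some 0
    else (pvFirstMatch key ps).map (· + 1)

-- Source B's _section
def pvSectionB (config : List (String × String)) (sec : String) : List (String × String) :=
  let chain := (List.lookup sec config).getD ""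
  if chain = "" then []
  else
    let aliases := PySem.List.dedup (pvAliases chain.toList)
    let prefixes := aliases.map (pvPrefix sec.toList)
    let buckets := config.foldl
      (fun (bs : List (List (String × String))) kv =>
        match pvFirstMatch kv.1.toList prefixes with
        | some j => bs.set j ((bs.getD j []) ++ [kv])
        | none => bs)
      (aliases.map fun _ => [])
    (sec, chain) :: buckets.flatten

def extract_transforms_config_alt (config : List (String × String)) : List (String × String) :=
  pvSectionB config "transforms" ++ pvSectionB config "predicates"

-- ===== PRECONDITION & SPEC =====
-- Pre_ excludes association lists with duplicate keys: the Python argument is a dict, which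
-- cannot hold duplicate keys, so such lists do not represent any actual input of A.
def Pre_extract_transforms_config (config : List (String × String)) : Prop :=
  (config.map Prod.fst).Nodup
instance (config : List (String × String)) : Decidable (Pre_extract_transforms_config config) := by
  unfold Pre_extract_transforms_config; infer_instance

def pvWitness_extract_transforms_config : (List (String × String)) :=
  [("transforms", " a , b "), ("transforms.a.type", "X"), ("transforms.b.type", "Y"),
   ("predicates", "p"), ("predicates.p.type", "Z"), ("other", "v")]

def Spec_extract_transforms_config (config : List (String × String)) (out : List (String × String)) : Prop := out = extract_transforms_config_alt config
instance (config : List (String × String)) (out : List (String × String)) : Decidable (Spec_extract_transforms_config config out) := by unfold Spec_extract_transforms_config; infer_instance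

-- ===== CLAIM (what is proved, stated in full; the proofs are below) =====
def Claim_equal_extract_transforms_config : Prop := ∀ (config : List (String × String)), Dom_extract_transforms_config config → Pre_extract_transforms_config config → Spec_extract_transforms_config config (extract_transforms_config config)

-- ===== LEMMAS AND PROOFS =====

-- proof-only abbreviation for the matching test both programs perform
def pvMatch (sec a : List Char) (kv : String × String) : Bool :=
  PySem.Chars.startswith kv.1.toList (pvPrefix sec a)

-- canonical per-section tail: bucket of the first alias, then recurse on the unmatched rest
def canonB (sec : List Char) : List (List Char) → List (String × String) → List (String × String)
  | [], _ => []
  | a :: as, C =>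
      C.filter (pvMatch sec a) ++ canonB sec as (C.filter (fun kv => !pvMatch sec a kv))

lemma key_unique {config : List (String × String)} (h : (config.map Prod.fst).Nodup)
    {kv kv' : String × String} (h1 : kv ∈ config) (h2 : kv' ∈ config) (he : kv.1 = kv'.1) :
    kv = kv' := List.inj_on_of_nodup_map h h1 h2 he

lemma lookup_mem {l : List (String × String)} {k : String} {v : String}
    (h : List.lookup k l = some v) : (k, v) ∈ l := by
  induction l with
  | nil => simp [List.lookup] at h
  | cons p t ih =>
    obtain ⟨a, b⟩ := p
    rw [List.lookup] at h
    cases hak : (k == a) with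
    | true =>
      rw [hak] at h
      simp only [Option.some.injEq] at h
      have hk : k = a := by simpa using hak
      simp [hk, h]
    | false =>
      rw [hak] at h
      exact List.mem_cons_of_mem _ (ih h)

lemma keys_eq_items_map (d : PySem.Dict String String) : d.keys = d.items.map Prod.fst := rfl

lemma contains_iff_items (d : PySem.Dict String String) (k : String) :
    d.contains k = true ↔ k ∈ d.items.map Prod.fst := by
  rw [PySem.Dict.contains_iff_mem_keys, keys_eq_items_map]

lemma insert_eq_self (d : PySem.Dict String String) (hd : d.keys.Nodup) {k v : String}
    (h : d.get? k = some v) : d.insert k v = d := by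
  apply PySem.Dict.ext
  have hc : d.contains k = true := by
    rw [PySem.Dict.contains_eq_isSome_get?, h]; rfl
  rw [PySem.Dict.items_insert_of_contains d v hc]
  conv_rhs => rw [← List.map_id d.items]
  apply List.map_congr_left
  intro p hp
  by_cases hpk : p.1 = k
  · have hg := PySem.Dict.get?_of_mem_items d hp hd
    rw [hpk, h] at hg
    have : p = (k, v) := by
      obtain ⟨p1, p2⟩ := p
      simp only at hpk
      cases hg
      simp [hpk]
    simp [this]
  · simp [hpk]

lemma foldl_insertIf (P : String × String → Bool) (l : List (String × String))
    (d : PySem.Dict String String)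
    (hl : (l.map Prod.fst).Nodup) (hd : d.keys.Nodup)
    (hv : ∀ kv ∈ l, d.contains kv.1 = true → d.get? kv.1 = some kv.2) :
    (l.foldl (fun d kv => if P kv then d.insert kv.1 kv.2 else d) d).items
      = d.items ++ l.filter (fun kv => P kv && !(d.contains kv.1)) := by
  induction l generalizing d with
  | nil => simp
  | cons kv t ih =>
    rw [List.map_cons] at hl
    have hnodup := List.nodup_cons.mp hl
    have hl' : (t.map Prod.fst).Nodup := hnodup.2
    have hne : ∀ kv' ∈ t, kv'.1 ≠ kv.1 := by
      intro kv' h' he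
      exact hnodup.1 (he ▸ List.mem_map_of_mem (f := Prod.fst) h')
    simp only [List.foldl_cons, List.filter_cons]
    by_cases hP : P kv
    · cases hc : d.contains kv.1 with
      | true =>
        have hins : d.insert kv.1 kv.2 = d :=
          insert_eq_self d hd (hv kv (List.mem_cons_self) hc)
        rw [if_pos hP, hins, ih d hl' hd (fun kv' h' => hv kv' (List.mem_cons_of_mem _ h'))]
        simp [hP]

      | false =>
        have hd' : (d.insert kv.1 kv.2).keys.Nodup := PySem.Dict.nodup_keys_insert _ _ _ hd
        have hco : ∀ x : String, x ≠ kv.1 →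
            (d.insert kv.1 kv.2).contains x = d.contains x := by
          intro x hx
          rw [PySem.Dict.contains_insert]
          simp [hx]
        have hv' : ∀ kv' ∈ t, (d.insert kv.1 kv.2).contains kv'.1 = true →
            (d.insert kv.1 kv.2).get? kv'.1 = some kv'.2 := by
          intro kv' h' hc'
          rw [PySem.Dict.get?_insert_of_ne _ _ (hne kv' h')]
          exact hv kv' (List.mem_cons_of_mem _ h') (by rw [← hco kv'.1 (hne kv' h')]; exact hc')
        rw [if_pos hP, ih (d.insert kv.1 kv.2) hl' hd' hv',
          PySem.Dict.items_insert_of_not_contains d _ hc]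
        have hfil : t.filter (fun kv' => P kv' && !((d.insert kv.1 kv.2).contains kv'.1))
            = t.filter (fun kv' => P kv' && !(d.contains kv'.1)) := by
          apply List.filter_congr
          intro kv' h'
          rw [hco kv'.1 (hne kv' h')]
        rw [hfil]
        simp [hP]
    · rw [if_neg hP, ih d hl' hd (fun kv' h' => hv kv' (List.mem_cons_of_mem _ h'))]
      simp [hP]

lemma aliasFold (config : List (String × String)) (sec : List Char)
    (hcfg : (config.map Prod.fst).Nodup)
    (as : List (List Char)) (d : PySem.Dict String String)
    (hd : d.keys.Nodup)
    (hv : ∀ kv ∈ config, d.contains kv.1 = true → d.get? kv.1 = some kv.2) :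
    (as.foldl
      (fun d a => config.foldl
        (fun d kv => if PySem.Chars.startswith kv.1.toList (pvPrefix sec a) then
            d.insert kv.1 kv.2 else d) d) d).items
      = d.items ++ canonB sec as (config.filter (fun kv => !(d.contains kv.1))) := by
  induction as generalizing d with
  | nil => simp [canonB]
  | cons a as ih =>
    simp only [List.foldl_cons]
    have hit1 := foldl_insertIf
      (fun kv => PySem.Chars.startswith kv.1.toList (pvPrefix sec a)) config d hcfg hd hv
    have hit1' : (config.foldl
        (fun d kv => if PySem.Chars.startswith kv.1.toList (pvPrefix sec a) then
          d.insert kv.1 kv.2 else d) d).items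
        = d.items ++ config.filter (fun kv => pvMatch sec a kv && !(d.contains kv.1)) := hit1
    set C := config.filter (fun kv => !(d.contains kv.1)) with hC
    set d1 := config.foldl
      (fun d kv => if PySem.Chars.startswith kv.1.toList (pvPrefix sec a) then
        d.insert kv.1 kv.2 else d) d with hd1def
    have hsplit : config.filter (fun kv => pvMatch sec a kv && !(d.contains kv.1))
        = C.filter (pvMatch sec a) := by
      rw [hC, List.filter_filter]
    have hitems1 : d1.items = d.items ++ C.filter (pvMatch sec a) := by
      rw [← hsplit]; exact hit1'
    have hkeys1 : d1.keys = d.keys ++ (C.filter (pvMatch sec a)).map Prod.fst := by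
      rw [keys_eq_items_map, hitems1, List.map_append, ← keys_eq_items_map]
    have hsubnodup : ((C.filter (pvMatch sec a)).map Prod.fst).Nodup := by
      apply List.Nodup.sublist (List.Sublist.map Prod.fst ?_) hcfg
      exact List.filter_sublist.trans List.filter_sublist
    have hnd1 : d1.keys.Nodup := by
      rw [hkeys1]
      refine hd.append hsubnodup ?_
      intro x hx hx2
      obtain ⟨kv', hkv', he⟩ := List.mem_map.mp hx2
      have hcf : (!(d.contains kv'.1)) = true :=
        (List.mem_filter.mp (List.mem_filter.mp hkv').1).2
      rw [he] at hcf
      rw [← PySem.Dict.contains_iff_mem_keys] at hx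
      simp [hx] at hcf
    have hmemiff : ∀ kv ∈ config,
        (d1.contains kv.1 = true ↔ (d.contains kv.1 = true ∨ pvMatch sec a kv = true)) := by
      intro kv hkv
      rw [PySem.Dict.contains_iff_mem_keys, hkeys1, List.mem_append,
        ← PySem.Dict.contains_iff_mem_keys]
      constructor
      · rintro (h | h)
        · exact Or.inl h
        · obtain ⟨kv', hkv', he⟩ := List.mem_map.mp h
          have hkv'C := List.mem_filter.mp hkv'
          have hkv'cfg : kv' ∈ config := (List.mem_filter.mp hkv'C.1).1
          have : kv' = kv := key_unique hcfg hkv'cfg hkv he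
          exact Or.inr (this ▸ hkv'C.2)
      · rintro (h | h)
        · exact Or.inl h
        · cases hdc : d.contains kv.1 with
          | true => exact Or.inl rfl
          | false =>
            right
            exact List.mem_map.mpr ⟨kv,
              List.mem_filter.mpr ⟨List.mem_filter.mpr ⟨hkv, by simp [hdc]⟩, h⟩, rfl⟩
    have hv1 : ∀ kv ∈ config, d1.contains kv.1 = true → d1.get? kv.1 = some kv.2 := by
      intro kv hkv hc'
      have hmem : (kv.1, kv.2) ∈ d1.items := by
        rw [hitems1]
        apply List.mem_append.mpr
        cases hdc : d.contains kv.1 with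
        | true =>
          exact Or.inl (PySem.Dict.mem_items_of_get?_eq_some d (hv kv hkv hdc))
        | false =>
          have hp : pvMatch sec a kv = true := by
            rcases (hmemiff kv hkv).1 hc' with h | h
            · rw [hdc] at h; cases h
            · exact h
          exact Or.inr (List.mem_filter.mpr
            ⟨List.mem_filter.mpr ⟨hkv, by simp [hdc]⟩, hp⟩)
      exact PySem.Dict.get?_of_mem_items d1 hmem hnd1
    rw [ih d1 hnd1 hv1, hitems1]
    have hcbool : ∀ kv ∈ config,
        (!(d1.contains kv.1)) = (!pvMatch sec a kv && !(d.contains kv.1)) := by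
      intro kv hkv
      cases h3 : pvMatch sec a kv with
      | true =>
        have h1 : d1.contains kv.1 = true := (hmemiff kv hkv).2 (Or.inr h3)
        rw [h1]; simp
      | false =>
        cases h2 : d.contains kv.1 with
        | true =>
          have h1 : d1.contains kv.1 = true := (hmemiff kv hkv).2 (Or.inl h2)
          rw [h1]; simp
        | false =>
          have h1 : d1.contains kv.1 = false := by
            cases h1 : d1.contains kv.1 with
            | false => rfl
            | true =>
              rcases (hmemiff kv hkv).1 h1 with h | h
              · rw [h2] at h; cases h
              · rw [h3] at h; cases h
          rw [h1]; simp
    have hfil2 : config.filter (fun kv => !(d1.contains kv.1))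
        = C.filter (fun kv => !pvMatch sec a kv) := by
      rw [hC, List.filter_filter]
      exact List.filter_congr hcbool
    rw [hfil2]
    conv_rhs => rw [canonB]
    rw [List.append_assoc]

lemma mem_canonB {sec : List Char} {as : List (List Char)} {C : List (String × String)}
    {kv : String × String} (h : kv ∈ canonB sec as C) :
    kv ∈ C ∧ ∃ a ∈ as, pvMatch sec a kv = true := by
  induction as generalizing C with
  | nil => simp [canonB] at h
  | cons a as ih =>
    rw [canonB] at h
    rcases List.mem_append.mp h with h1 | h2
    · obtain ⟨hC, hp⟩ := List.mem_filter.mp h1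
      exact ⟨hC, a, List.mem_cons_self, hp⟩
    · obtain ⟨hC, a', ha', hp⟩ := ih h2
      exact ⟨(List.mem_filter.mp hC).1, a', List.mem_cons_of_mem _ ha', hp⟩

lemma canonB_filter_superset {sec : List Char} (as : List (List Char))
    (C : List (String × String)) (q : String × String → Bool)
    (h : ∀ kv ∈ C, q kv = false → ∀ a ∈ as, pvMatch sec a kv = false) :
    canonB sec as (C.filter q) = canonB sec as C := by
  induction as generalizing C with
  | nil => rfl
  | cons a as ih =>
    rw [canonB, canonB]
    have h1 : (C.filter q).filter (pvMatch sec a) = C.filter (pvMatch sec a) := by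
      rw [List.filter_filter]
      apply List.filter_congr
      intro kv hkv
      cases hq : q kv with
      | true => simp
      | false => simp [h kv hkv hq a List.mem_cons_self]
    have h2 : (C.filter q).filter (fun kv => !pvMatch sec a kv)
        = (C.filter (fun kv => !pvMatch sec a kv)).filter q := by
      rw [List.filter_filter, List.filter_filter]
      apply List.filter_congr
      intro kv _
      rw [Bool.and_comm]
    rw [h1, h2, ih (C.filter (fun kv => !pvMatch sec a kv))
      (fun kv hkv hq a' ha' => h kv (List.mem_filter.mp hkv).1 hq a' (List.mem_cons_of_mem _ ha'))]

lemma canonB_drop {sec : List Char} {a : List Char} (as : List (List Char))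
    (C : List (String × String)) (h : ∀ kv ∈ C, pvMatch sec a kv = false) :
    canonB sec as C = canonB sec (as.filter (fun b => b ≠ a)) C := by
  induction as generalizing C with
  | nil => rfl
  | cons b as ih =>
    by_cases hb : b = a
    · subst hb
      have hfb : C.filter (pvMatch sec b) = [] := by
        apply List.filter_eq_nil_iff.mpr
        intro kv hkv
        simp [h kv hkv]
      have hfb' : C.filter (fun kv => !pvMatch sec b kv) = C := by
        apply List.filter_eq_self.mpr
        intro kv hkv
        simp [h kv hkv]
      rw [canonB, hfb, hfb', List.nil_append, ih C h]
      simp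
    · have hfil : (b :: as).filter (fun x => x ≠ a) = b :: as.filter (fun x => x ≠ a) := by
        simp [hb]
      rw [hfil, canonB, canonB,
        ih (C.filter (fun kv => !pvMatch sec b kv))
          (fun kv hkv => h kv (List.mem_filter.mp hkv).1)]

lemma dedup_cons (a : List Char) (as : List (List Char)) :
    PySem.List.dedup (a :: as)
      = a :: (PySem.List.dedup as).filter (fun b => b ≠ a) := by
  show PySem.Set.ofList (a :: as) = _
  have h1 : PySem.Set.ofList (a :: as) = PySem.Set.update (PySem.Set.add PySem.Set.empty a) as := rfl
  have h2 : PySem.Set.add PySem.Set.empty a = [a] := rfl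
  rw [h1, h2, PySem.Set.update_eq_append_filter]
  simp only [List.singleton_append, List.cons.injEq, true_and]
  apply List.filter_congr
  intro b _
  show (!PySem.Set.contains [a] b) = _
  simp [PySem.Set.contains]

lemma canonB_dedup (sec : List Char) (as : List (List Char)) (C : List (String × String)) :
    canonB sec as C = canonB sec (PySem.List.dedup as) C := by
  induction as generalizing C with
  | nil => rfl
  | cons a as ih =>
    rw [dedup_cons, canonB, canonB]
    congr 1
    rw [ih (C.filter (fun kv => !pvMatch sec a kv))]
    apply canonB_drop
    intro kv hkv
    have := (List.mem_filter.mp hkv).2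
    simpa using this

lemma pvFirstMatch_lt {key : List Char} {ps : List (List Char)} {j : Nat}
    (h : pvFirstMatch key ps = some j) : j < ps.length := by
  induction ps generalizing j with
  | nil => simp [pvFirstMatch] at h
  | cons p t ih =>
    rw [pvFirstMatch] at h
    split at h
    · cases h; simp
    · obtain ⟨j', hj', rfl⟩ := Option.map_eq_some_iff.mp h
      simpa using Nat.succ_lt_succ (ih hj')

lemma bucketsFold (C : List (String × String)) (prefixes : List (List Char))
    (bs0 : List (List (String × String))) (hlen : bs0.length = prefixes.length) :
    (C.foldl
      (fun (bs : List (List (String × String))) kv =>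
        match pvFirstMatch kv.1.toList prefixes with
        | some j => bs.set j ((bs.getD j []) ++ [kv])
        | none => bs) bs0).length = bs0.length ∧
    ∀ j : Nat, (C.foldl
      (fun (bs : List (List (String × String))) kv =>
        match pvFirstMatch kv.1.toList prefixes with
        | some j => bs.set j ((bs.getD j []) ++ [kv])
        | none => bs) bs0).getD j []
      = bs0.getD j [] ++ C.filter (fun kv => pvFirstMatch kv.1.toList prefixes == some j) := by
  induction C generalizing bs0 with
  | nil => exact ⟨rfl, fun j => by simp⟩
  | cons kv t ih =>
    simp only [List.foldl_cons]
    cases hm : pvFirstMatch kv.1.toList prefixes with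
    | none =>
      dsimp only
      obtain ⟨L, G⟩ := ih bs0 hlen
      refine ⟨L, fun j => ?_⟩
      rw [G j, List.filter_cons]
      simp [hm]
    | some j0 =>
      dsimp only
      have hj0 : j0 < bs0.length := hlen ▸ pvFirstMatch_lt hm
      have hlen1 : (bs0.set j0 ((bs0.getD j0 []) ++ [kv])).length = prefixes.length := by
        simpa using hlen
      obtain ⟨L, G⟩ := ih _ hlen1
      refine ⟨L.trans (by simp), fun j => ?_⟩
      rw [G j, List.filter_cons]
      have hget : (bs0.set j0 ((bs0.getD j0 []) ++ [kv])).getD j []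
          = if j = j0 then bs0.getD j [] ++ [kv] else bs0.getD j [] := by
        by_cases hj : j = j0
        · subst hj
          simp [List.getD, hj0]
        · have hj' : j0 ≠ j := fun h => hj h.symm
          simp [List.getD, hj', hj]
      rw [hget]
      by_cases hj : j = j0
      · subst hj
        simp [hm, List.append_assoc]
      · have : (some j0 == some j) = false := by
          simp [beq_eq_false_iff_ne, Ne.symm hj]
        simp [hm, this, hj]

lemma flat_firstMatch (sec : List Char) (as : List (List Char)) (C : List (String × String)) :
    (List.range as.length).flatMap
      (fun j => C.filter (fun kv => pvFirstMatch kv.1.toList (as.map (pvPrefix sec)) == some j))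
      = canonB sec as C := by
  induction as generalizing C with
  | nil => simp [canonB]
  | cons a as ih =>
    rw [List.length_cons, List.range_succ_eq_map, List.map_cons, List.flatMap_cons]
    have h0 : C.filter (fun kv =>
        pvFirstMatch kv.1.toList (pvPrefix sec a :: as.map (pvPrefix sec)) == some 0)
        = C.filter (pvMatch sec a) := by
      apply List.filter_congr
      intro kv _
      rw [pvFirstMatch, pvMatch]
      cases hsw : PySem.Chars.startswith kv.1.toList (pvPrefix sec a)
      · cases pvFirstMatch kv.1.toList (as.map (pvPrefix sec)) <;> simp
      · simp
    have hsucc : ∀ j : Nat, C.filter (fun kv =>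
        pvFirstMatch kv.1.toList (pvPrefix sec a :: as.map (pvPrefix sec)) == some (j + 1))
        = (C.filter (fun kv => !pvMatch sec a kv)).filter
            (fun kv => pvFirstMatch kv.1.toList (as.map (pvPrefix sec)) == some j) := by
      intro j
      rw [List.filter_filter]
      apply List.filter_congr
      intro kv _
      rw [pvFirstMatch]
      cases hsw : PySem.Chars.startswith kv.1.toList (pvPrefix sec a)
      · cases pvFirstMatch kv.1.toList (as.map (pvPrefix sec)) <;> simp [pvMatch, hsw]
      · simp [pvMatch, hsw]
    have hmap : (List.map Nat.succ (List.range as.length)).flatMap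
        (fun j => C.filter (fun kv =>
          pvFirstMatch kv.1.toList (pvPrefix sec a :: as.map (pvPrefix sec)) == some j))
        = (List.range as.length).flatMap (fun j =>
            (C.filter (fun kv => !pvMatch sec a kv)).filter
              (fun kv => pvFirstMatch kv.1.toList (as.map (pvPrefix sec)) == some j)) := by
      rw [List.flatMap_def, List.flatMap_def, List.map_map]
      congr 1
      apply List.map_congr_left
      intro j _
      exact hsucc j
    rw [h0, hmap, ih]
    conv_rhs => rw [canonB]

lemma bs0_getD (aliases : List (List Char)) (j : Nat) :
    (aliases.map (fun _ => ([] : List (String × String)))).getD j [] = [] := by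
  rw [List.getD, List.getElem?_map]
  cases aliases[j]? <;> simp

lemma sectionB_eq (config : List (String × String)) (sec : String) :
    pvSectionB config sec
      = (if (List.lookup sec config).getD "" = "" then []
         else ((sec, (List.lookup sec config).getD "") ::
           canonB sec.toList (PySem.List.dedup (pvAliases ((List.lookup sec config).getD "").toList)) config)) := by
  by_cases hch : (List.lookup sec config).getD "" = ""
  · simp [pvSectionB, hch]
  · rw [pvSectionB]
    simp only [if_neg hch]
    congr 1
    set as := PySem.List.dedup (pvAliases ((List.lookup sec config).getD "").toList) with has
    obtain ⟨L, G⟩ := bucketsFold config (as.map (pvPrefix sec.toList))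
      (as.map fun _ => []) (by simp)
    set res := config.foldl
      (fun (bs : List (List (String × String))) kv =>
        match pvFirstMatch kv.1.toList (as.map (pvPrefix sec.toList)) with
        | some j => bs.set j ((bs.getD j []) ++ [kv])
        | none => bs) (as.map fun _ => []) with hres
    have hlenB : res.length = as.length := by rw [L]; simp
    have hbuckets : res = (List.range as.length).map (fun j => config.filter
        (fun kv => pvFirstMatch kv.1.toList (as.map (pvPrefix sec.toList)) == some j)) := by
      apply List.ext_getElem (by simp [hlenB])
      intro i h1 h2
      have hG := G i
      rw [bs0_getD, List.nil_append, List.getD_eq_getElem res [] h1] at hG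
      rw [hG, List.getElem_map, List.getElem_range]
    rw [hbuckets, ← List.flatMap_def, flat_firstMatch]

lemma prefix_first {l p : List Char} (h : p <+: l) (hne : p ≠ []) : l.head? = p.head? := by
  obtain ⟨t, rfl⟩ := h
  cases p with
  | nil => exact absurd rfl hne
  | cons c cs => rfl

lemma pvMatch_startswith {sec a : List Char} {kv : String × String}
    (h : pvMatch sec a kv = true) :
    PySem.Chars.startswith kv.1.toList (sec ++ ['.']) = true := by
  rw [pvMatch, PySem.Chars.startswith, List.isPrefixOf_iff_prefix] at h
  rw [PySem.Chars.startswith, List.isPrefixOf_iff_prefix]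
  have hsplit : pvPrefix sec a = (sec ++ ['.']) ++ (a ++ ['.']) := by
    simp [pvPrefix]
  rw [hsplit] at h
  exact (List.prefix_append _ _).trans h

lemma pvMatch_ne_sec {sec : String} {a : List Char} {kv : String × String}
    (h : pvMatch sec.toList a kv = true) : kv.1 ≠ sec := by
  intro he
  rw [pvMatch, PySem.Chars.startswith, List.isPrefixOf_iff_prefix] at h
  have hlen := h.length_le
  rw [he] at hlen
  simp [pvPrefix] at hlen

lemma sectionAB (config : List (String × String)) (sec : String)
    (hcfg : (config.map Prod.fst).Nodup) (d : PySem.Dict String String)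
    (hd : d.keys.Nodup) (h1 : d.contains sec = false)
    (h2 : ∀ kv ∈ config, PySem.Chars.startswith kv.1.toList (sec.toList ++ ['.']) = true →
            d.contains kv.1 = false)
    (hv : ∀ kv ∈ config, d.contains kv.1 = true → d.get? kv.1 = some kv.2) :
    (pvSectionA config sec d).items = d.items ++ pvSectionB config sec := by
  rw [sectionB_eq, pvSectionA]
  by_cases hch : (List.lookup sec config).getD "" = ""
  · simp [hch]
  · simp only [if_neg hch]
    have hlk : List.lookup sec config = some ((List.lookup sec config).getD "") := by
      cases hl : List.lookup sec config with
      | none => exact absurd (by rw [hl]; rfl) hch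
      | some v => rfl
    set chain := (List.lookup sec config).getD "" with hchain
    have hmem : (sec, chain) ∈ config := lookup_mem hlk
    have hd2 : (d.insert sec chain).keys.Nodup := PySem.Dict.nodup_keys_insert _ _ _ hd
    have hv2 : ∀ kv ∈ config, (d.insert sec chain).contains kv.1 = true →
        (d.insert sec chain).get? kv.1 = some kv.2 := by
      intro kv hkv hc
      by_cases hks : kv.1 = sec
      · have hkveq : kv = (sec, chain) := key_unique hcfg hkv hmem hks
        rw [hkveq]
        exact PySem.Dict.get?_insert_self d sec chain
      · rw [PySem.Dict.get?_insert_of_ne d chain hks]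
        rw [PySem.Dict.contains_insert] at hc
        simp only [beq_eq_false_iff_ne.mpr hks, Bool.false_or] at hc
        exact hv kv hkv hc
    rw [aliasFold config sec.toList hcfg (pvAliases chain.toList) (d.insert sec chain) hd2 hv2]
    have hfil : canonB sec.toList (pvAliases chain.toList)
        (config.filter (fun kv => !((d.insert sec chain).contains kv.1)))
        = canonB sec.toList (pvAliases chain.toList) config := by
      apply canonB_filter_superset
      intro kv hkv hq a _
      cases hp : pvMatch sec.toList a kv with
      | false => rfl
      | true =>
        exfalso
        have hne := pvMatch_ne_sec hp
        have hdc : d.contains kv.1 = false := h2 kv hkv (pvMatch_startswith hp)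
        rw [PySem.Dict.contains_insert] at hq
        simp [beq_eq_false_iff_ne.mpr hne, hdc] at hq
    rw [hfil, canonB_dedup sec.toList (pvAliases chain.toList) config,
      PySem.Dict.items_insert_of_not_contains d chain h1]
    simp [List.append_assoc]

lemma mem_sectionB {config : List (String × String)} {sec : String} {kv : String × String}
    (h : kv ∈ pvSectionB config sec) :
    kv ∈ config ∧ (kv.1 = sec ∨ PySem.Chars.startswith kv.1.toList (sec.toList ++ ['.']) = true) := by
  rw [sectionB_eq] at h
  by_cases hch : (List.lookup sec config).getD "" = ""
  · rw [if_pos hch] at h; cases h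
  · rw [if_neg hch] at h
    have hlk : List.lookup sec config = some ((List.lookup sec config).getD "") := by
      cases hl : List.lookup sec config with
      | none => exact absurd (by rw [hl]; rfl) hch
      | some v => rfl
    rcases List.mem_cons.mp h with h1 | h2
    · exact ⟨by rw [h1]; exact lookup_mem hlk, Or.inl (by rw [h1])⟩
    · obtain ⟨hC, a, _, hp⟩ := mem_canonB h2
      exact ⟨hC, Or.inr (pvMatch_startswith hp)⟩

lemma nodup_keys_foldl_insertIf (P : String × String → Bool) (l : List (String × String))
    (d : PySem.Dict String String) (hd : d.keys.Nodup) :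
    (l.foldl (fun d kv => if P kv then d.insert kv.1 kv.2 else d) d).keys.Nodup := by
  induction l generalizing d with
  | nil => exact hd
  | cons kv t ih =>
    simp only [List.foldl_cons]
    by_cases hP : P kv
    · rw [if_pos hP]; exact ih _ (PySem.Dict.nodup_keys_insert _ _ _ hd)
    · rw [if_neg hP]; exact ih _ hd

lemma nodup_keys_sectionA (config : List (String × String)) (sec : String)
    (d : PySem.Dict String String) (hd : d.keys.Nodup) :
    (pvSectionA config sec d).keys.Nodup := by
  rw [pvSectionA]
  by_cases hch : (List.lookup sec config).getD "" = ""
  · simp only [if_pos hch]; exact hd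
  · simp only [if_neg hch]
    have haux : ∀ (as : List (List Char)) (d0 : PySem.Dict String String),
        d0.keys.Nodup →
        (as.foldl (fun d a => config.foldl
          (fun d kv => if PySem.Chars.startswith kv.1.toList (pvPrefix sec.toList a) then
            d.insert kv.1 kv.2 else d) d) d0).keys.Nodup := by
      intro as
      induction as with
      | nil => intro d0 h0; exact h0
      | cons a t ih =>
        intro d0 h0
        simp only [List.foldl_cons]
        apply ih
        exact nodup_keys_foldl_insertIf _ config d0 h0
    exact haux _ _ (PySem.Dict.nodup_keys_insert _ _ _ hd)

-- ===== VERDICT (by name: the statement is the Claim_ definition above) =====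
theorem extract_transforms_config_spec : Claim_equal_extract_transforms_config := by
  intro config _ hPre
  unfold Spec_extract_transforms_config
  unfold Pre_extract_transforms_config at hPre
  unfold extract_transforms_config extract_transforms_config_alt
  have hTrans := sectionAB config "transforms" hPre PySem.Dict.empty PySem.Dict.nodup_keys_empty
    (PySem.Dict.contains_empty _) (fun kv _ _ => PySem.Dict.contains_empty _)
    (fun kv _ hc => by rw [PySem.Dict.contains_empty] at hc; cases hc)
  set d1 := pvSectionA config "transforms" PySem.Dict.empty with hd1
  have hd1items : d1.items = pvSectionB config "transforms" := by
    rw [hTrans]; rfl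
  have hnd1 : d1.keys.Nodup :=
    nodup_keys_sectionA config "transforms" PySem.Dict.empty PySem.Dict.nodup_keys_empty
  have hcont1 : ∀ k : String, d1.contains k = true →
      ∃ kv', kv' ∈ pvSectionB config "transforms" ∧ kv' ∈ config ∧ kv'.1 = k ∧
        (kv'.1 = "transforms" ∨
          PySem.Chars.startswith kv'.1.toList ("transforms".toList ++ ['.']) = true) := by
    intro k hk
    have hmemk := (contains_iff_items d1 k).mp hk
    rw [hd1items] at hmemk
    obtain ⟨kv', hkv', he⟩ := List.mem_map.mp hmemk
    obtain ⟨hcfg', hor⟩ := mem_sectionB hkv'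
    exact ⟨kv', hkv', hcfg', he, hor⟩
  have h1' : d1.contains "predicates" = false := by
    cases hc : d1.contains "predicates" with
    | false => rfl
    | true =>
      exfalso
      obtain ⟨kv', _, _, he, hor⟩ := hcont1 _ hc
      rcases hor with h | h
      · rw [he] at h; exact absurd h (by decide)
      · rw [he] at h; exact absurd h (by decide)
  have h2' : ∀ kv ∈ config,
      PySem.Chars.startswith kv.1.toList ("predicates".toList ++ ['.']) = true →
      d1.contains kv.1 = false := by
    intro kv hkv hsw
    cases hc : d1.contains kv.1 with
    | false => rfl
    | true =>
      exfalso
      obtain ⟨kv', _, _, he, hor⟩ := hcont1 _ hc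
      rcases hor with h | h
      · rw [he] at h
        rw [h] at hsw
        exact absurd hsw (by decide)
      · rw [he] at h
        have h' : ("transforms".toList ++ ['.']).isPrefixOf kv.1.toList = true := h
        have hsw' : ("predicates".toList ++ ['.']).isPrefixOf kv.1.toList = true := hsw
        have e1 := prefix_first (List.isPrefixOf_iff_prefix.mp h') (by decide)
        have e2 := prefix_first (List.isPrefixOf_iff_prefix.mp hsw') (by decide)
        rw [e1] at e2
        exact absurd e2 (by decide)
  have hv1 : ∀ kv ∈ config, d1.contains kv.1 = true → d1.get? kv.1 = some kv.2 := by
    intro kv hkv hc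
    obtain ⟨kv', hB, hcfg', he, _⟩ := hcont1 _ hc
    have hkveq : kv' = kv := key_unique hPre hcfg' hkv he
    apply PySem.Dict.get?_of_mem_items d1 ?_ hnd1
    show (kv.1, kv.2) ∈ d1.items
    rw [hd1items]
    exact hkveq ▸ hB
  have hPred := sectionAB config "predicates" hPre d1 hnd1 h1' h2' hv1
  rw [hPred, hd1items]
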